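-- pv_equiv track=rewrite | github.com/haibaaa/bombsquad | src/mines/solver/count.py | required_mines_in_region
-- ===== SOURCE A (Python) =====
-- def required_mines_in_region(region, board, revealed, flagged):
--     """Return how many mines MUST be in this region, based on adjacent numbers."""
--     rows = len(board)
--     cols = len(board[0])
--     required = 0
--     for (r, c) in region:
--         # Check neighbors
--         for dr in (-1, 0, 1):
--             for dc in (-1, 0, 1):
--                 if dr == 0 and dc == 0:
--                     continue
--
--                 nr = r + dr
--                 nc = c + dc
--
--                 if 0 <= nr < len(board) and 0 <= nc < len(board[0]):
--                     if revealed[nr][nc] and board[nr][nc] > 0: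
--                         # board number minus flagged neighbors gives unaccounted mines
--                         mines_left = board[nr][nc]
--
--                         flagged_count = 0
--                         hidden_count = 0
--
--                         for x in (-1, 0, 1):
--                             for y in (-1, 0, 1):
--                                 rr = nr + x
--                                 cc = nc + y
--                                 if 0 <= rr < len(board) and 0 <= cc < len(board[0]):
--                                     if flagged[rr][cc]:
--                                         flagged_count += 1
--                                     elif not revealed[rr][cc]:
--                                         hidden_count += 1
--
--                         unaccounted = mines_left - flagged_count
--                         if unaccounted > 0:
--                             # distribute unaccounted mines evenly among region?
--                             required += unaccounted
--
--     return max(0, required)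
-- ===== SOURCE B (Python) =====
-- NEIGHBORS = [(-1, -1), (-1, 0), (-1, 1), (0, -1), (0, 1), (1, -1), (1, 0), (1, 1)]
--
--
-- def required_mines_in_region(region, board, revealed, flagged):
--     """Return how many mines MUST be in this region, based on adjacent numbers."""
--     rows = len(board)
--     cols = len(board[0])
--
--     # Pass 1: count, for each revealed positive-numbered cell, how many region
--     # cells (with multiplicity) are adjacent to it.
--     adjacency = {}
--     for (r, c) in region:
--         for (dr, dc) in NEIGHBORS:
--             nr, nc = r + dr, c + dc
--             if 0 <= nr < rows and 0 <= nc < cols and revealed[nr][nc] and board[nr][nc] > 0: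
--                 adjacency[(nr, nc)] = adjacency.get((nr, nc), 0) + 1
--
--     # Pass 2: each numbered cell's unaccounted mines, counted once, weighted
--     # by how many region occurrences are adjacent to it.
--     total = 0
--     for (nr, nc), cnt in adjacency.items():
--         flagged_count = sum(
--             1
--             for x in (-1, 0, 1)
--             for y in (-1, 0, 1)
--             if 0 <= nr + x < rows and 0 <= nc + y < cols and flagged[nr + x][nc + y]
--         )
--         unaccounted = board[nr][nc] - flagged_count
--         if unaccounted > 0:
--             total += unaccounted * cnt
--     return max(0, total)
-- ===== Notes on version B (the rewrite author's own statement) =====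
-- stated objective: alternative
-- what changed: B replaces A's per-(region-cell, neighbor) recomputation with two passes: it first builds a dict counting, with multiplicity, how many region occurrences are adjacent to each revealed positive-numbered cell, then computes each such cell's flagged count and unaccounted mines once and adds unaccounted * adjacency_count.
import Mathlib
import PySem

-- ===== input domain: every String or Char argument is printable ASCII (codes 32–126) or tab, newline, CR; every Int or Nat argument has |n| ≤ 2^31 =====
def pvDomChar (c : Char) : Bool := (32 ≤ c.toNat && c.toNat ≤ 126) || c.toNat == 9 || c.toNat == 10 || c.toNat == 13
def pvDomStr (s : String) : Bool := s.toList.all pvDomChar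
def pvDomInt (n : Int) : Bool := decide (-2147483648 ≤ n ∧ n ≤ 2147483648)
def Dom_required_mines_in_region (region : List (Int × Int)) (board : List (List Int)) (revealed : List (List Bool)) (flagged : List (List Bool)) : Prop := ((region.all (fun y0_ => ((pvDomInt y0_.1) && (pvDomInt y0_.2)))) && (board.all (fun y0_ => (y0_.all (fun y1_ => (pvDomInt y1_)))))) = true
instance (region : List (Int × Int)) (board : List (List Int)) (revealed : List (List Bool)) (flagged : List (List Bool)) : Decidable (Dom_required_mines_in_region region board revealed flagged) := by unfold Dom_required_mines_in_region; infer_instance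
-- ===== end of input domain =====

-- B groups A's per-(region-cell, neighbor) work: one pass counts region occurrences adjacent
-- to each revealed positive-numbered cell in a dict, a second pass scores each such cell once
-- and multiplies by its adjacency count (objective: alternative decomposition, same result).

-- ===== PORT A =====
-- shared literal helpers: the (-1, 0, 1) offset tuple and the '0 <= r < rows and 0 <= c < cols' test
def pvOffs3 : List Int := [-1, 0, 1]

def pvInB (rows cols r c : Int) : Bool :=
  decide (0 ≤ r) && decide (r < rows) && decide (0 ≤ c) && decide (c < cols)

-- body of A's innermost 'for x in (-1,0,1): for y in (-1,0,1)' loop over (flagged_count, hidden_count)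
def pvFHStep (board : List (List Int)) (revealed flagged : List (List Bool)) (nr nc : Int)
    (acc : Int × Int) (o : Int × Int) : Int × Int :=
  if pvInB (PySem.List.len board) (PySem.List.len (PySem.List.pyGetD board 0 [])) (nr + o.1) (nc + o.2) then
    if PySem.List.pyGetD (PySem.List.pyGetD flagged (nr + o.1) []) (nc + o.2) false then (acc.1 + 1, acc.2)
    else if !(PySem.List.pyGetD (PySem.List.pyGetD revealed (nr + o.1) []) (nc + o.2) false) then (acc.1, acc.2 + 1)
    else acc
  else acc

def pvFlagHid (board : List (List Int)) (revealed flagged : List (List Bool)) (nr nc : Int) : Int × Int :=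
  pvOffs3.foldl (fun acc x => pvOffs3.foldl (fun acc y => pvFHStep board revealed flagged nr nc acc (x, y)) acc) (0, 0)

-- body of A's 'for dr in (-1,0,1): for dc in (-1,0,1)' loop over one region cell rc
-- (mines_left - flagged_count is inlined as 'unaccounted')
def pvAStep (board : List (List Int)) (revealed flagged : List (List Bool)) (rc : Int × Int)
    (req : Int) (o : Int × Int) : Int :=
  if o.1 = 0 ∧ o.2 = 0 then req
  else
    if pvInB (PySem.List.len board) (PySem.List.len (PySem.List.pyGetD board 0 [])) (rc.1 + o.1) (rc.2 + o.2) then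
      if PySem.List.pyGetD (PySem.List.pyGetD revealed (rc.1 + o.1) []) (rc.2 + o.2) false &&
         decide (0 < PySem.List.pyGetD (PySem.List.pyGetD board (rc.1 + o.1) []) (rc.2 + o.2) 0) then
        if 0 < PySem.List.pyGetD (PySem.List.pyGetD board (rc.1 + o.1) []) (rc.2 + o.2) 0
                 - (pvFlagHid board revealed flagged (rc.1 + o.1) (rc.2 + o.2)).1 then
          req + (PySem.List.pyGetD (PySem.List.pyGetD board (rc.1 + o.1) []) (rc.2 + o.2) 0
                 - (pvFlagHid board revealed flagged (rc.1 + o.1) (rc.2 + o.2)).1)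
        else req
      else req
    else req

def required_mines_in_region (region : List (Int × Int)) (board : List (List Int)) (revealed : List (List Bool)) (flagged : List (List Bool)) : Int :=
  max 0 (region.foldl (fun req rc =>
    pvOffs3.foldl (fun req dr => pvOffs3.foldl (fun req dc => pvAStep board revealed flagged rc req (dr, dc)) req) req) 0)

-- ===== PORT B =====
def pvNbrs : List (Int × Int) := [(-1, -1), (-1, 0), (-1, 1), (0, -1), (0, 1), (1, -1), (1, 0), (1, 1)]

-- 'in-bounds, revealed, positive-numbered cell' test of B's first pass
def pvPass (board : List (List Int)) (revealed : List (List Bool)) (rows cols : Int) (cell : Int × Int) : Bool :=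
  pvInB rows cols cell.1 cell.2 &&
  PySem.List.pyGetD (PySem.List.pyGetD revealed cell.1 []) cell.2 false &&
  decide (0 < PySem.List.pyGetD (PySem.List.pyGetD board cell.1 []) cell.2 0)

-- B's first pass: the adjacency counter dict
def pvAdjacency (region : List (Int × Int)) (board : List (List Int)) (revealed : List (List Bool)) (rows cols : Int) : PySem.Dict (Int × Int) Int :=
  region.foldl (fun d rc =>
    pvNbrs.foldl (fun d o =>
      if pvPass board revealed rows cols (rc.1 + o.1, rc.2 + o.2) then
        d.insert (rc.1 + o.1, rc.2 + o.2) (d.getD (rc.1 + o.1, rc.2 + o.2) 0 + 1)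
      else d) d) PySem.Dict.empty

-- B's flagged_count comprehension: sum(1 for x ... for y ... if in-bounds and flagged)
def pvFlagCount (flagged : List (List Bool)) (rows cols nr nc : Int) : Int :=
  (((pvOffs3.flatMap fun x => pvOffs3.map fun y => (x, y))).filter (fun o =>
    pvInB rows cols (nr + o.1) (nc + o.2) &&
    PySem.List.pyGetD (PySem.List.pyGetD flagged (nr + o.1) []) (nc + o.2) false)).length

-- rows and cols (len(board), len(board[0])) are inlined at their use sites
def required_mines_in_region_alt (region : List (Int × Int)) (board : List (List Int)) (revealed : List (List Bool)) (flagged : List (List Bool)) : Int :=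
  max 0 ((pvAdjacency region board revealed (PySem.List.len board) (PySem.List.len (PySem.List.pyGetD board 0 []))).items.foldl
    (fun total kc =>
      if 0 < PySem.List.pyGetD (PySem.List.pyGetD board kc.1.1 []) kc.1.2 0
              - pvFlagCount flagged (PySem.List.len board) (PySem.List.len (PySem.List.pyGetD board 0 [])) kc.1.1 kc.1.2 then
        total + (PySem.List.pyGetD (PySem.List.pyGetD board kc.1.1 []) kc.1.2 0
              - pvFlagCount flagged (PySem.List.len board) (PySem.List.len (PySem.List.pyGetD board 0 [])) kc.1.1 kc.1.2) * kc.2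
      else total) 0)

-- ===== PRECONDITION & SPEC =====
-- offset tables and per-read bound checks used only to state Pre_
def pvPreOffs8 : List (Int × Int) := [(-1, -1), (-1, 0), (-1, 1), (0, -1), (0, 1), (1, -1), (1, 0), (1, 1)]
def pvPreOffs9 : List (Int × Int) := [(-1, -1), (-1, 0), (-1, 1), (0, -1), (0, 0), (0, 1), (1, -1), (1, 0), (1, 1)]

def pvInGridB (board : List (List Int)) (r c : Int) : Bool :=
  decide (0 ≤ r) && decide (r < (board.length : Int)) && decide (0 ≤ c) && decide (c < (board.headI.length : Int))

-- every read A performs at an in-grid neighbor (nr, nc) is in range: revealed[nr][nc] always,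
-- board[nr][nc] if revealed, and the 3×3 flagged[rr][cc] / revealed[rr][cc] reads if the number is positive
def pvCellSafeB (board : List (List Int)) (revealed flagged : List (List Bool)) (nr nc : Nat) : Bool :=
  decide (nr < revealed.length) && decide (nc < (revealed.getD nr []).length) &&
  (!(revealed.getD nr []).getD nc false ||
   (decide (nc < (board.getD nr []).length) &&
    (!decide (0 < (board.getD nr []).getD nc 0) ||
     pvPreOffs9.all (fun o =>
       !pvInGridB board ((nr : Int) + o.1) ((nc : Int) + o.2) ||
       (decide ((((nr : Int) + o.1).toNat) < flagged.length) &&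
        decide ((((nc : Int) + o.2).toNat) < (flagged.getD ((nr : Int) + o.1).toNat []).length) &&
        ((flagged.getD ((nr : Int) + o.1).toNat []).getD ((nc : Int) + o.2).toNat false ||
         (decide ((((nr : Int) + o.1).toNat) < revealed.length) &&
          decide ((((nc : Int) + o.2).toNat) < (revealed.getD ((nr : Int) + o.1).toNat []).length))))))))

-- Pre_ holds exactly where A returns: the board is nonempty (A reads board[0]) and every list read
-- A performs while scanning the in-grid neighbors of region cells is in range; the excluded inputs
-- are exactly those on which A raises IndexError.
def Pre_required_mines_in_region (region : List (Int × Int)) (board : List (List Int)) (revealed : List (List Bool)) (flagged : List (List Bool)) : Prop :=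
  board ≠ [] ∧
  (region.all (fun rc => pvPreOffs8.all (fun o =>
    !pvInGridB board (rc.1 + o.1) (rc.2 + o.2) ||
    pvCellSafeB board revealed flagged (rc.1 + o.1).toNat (rc.2 + o.2).toNat))) = true
instance (region : List (Int × Int)) (board : List (List Int)) (revealed : List (List Bool)) (flagged : List (List Bool)) : Decidable (Pre_required_mines_in_region region board revealed flagged) := by unfold Pre_required_mines_in_region; infer_instance

def pvWitness_required_mines_in_region : (List (Int × Int)) × List (List Int) × List (List Bool) × List (List Bool) :=
  ([(0, 0)], [[1]], [[true]], [[false]])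

def Spec_required_mines_in_region (region : List (Int × Int)) (board : List (List Int)) (revealed : List (List Bool)) (flagged : List (List Bool)) (out : Int) : Prop := out = required_mines_in_region_alt region board revealed flagged
instance (region : List (Int × Int)) (board : List (List Int)) (revealed : List (List Bool)) (flagged : List (List Bool)) (out : Int) : Decidable (Spec_required_mines_in_region region board revealed flagged out) := by unfold Spec_required_mines_in_region; infer_instance

-- ===== CLAIM (what is proved, stated in full; the proofs are below) =====
def Claim_equal_required_mines_in_region : Prop := ∀ (region : List (Int × Int)) (board : List (List Int)) (revealed : List (List Bool)) (flagged : List (List Bool)), Dom_required_mines_in_region region board revealed flagged → Pre_required_mines_in_region region board revealed flagged → Spec_required_mines_in_region region board revealed flagged (required_mines_in_region region board revealed flagged)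

-- ===== LEMMAS AND PROOFS =====

-- the multiset of (cell passing B's test, once per adjacent region occurrence)
def pvK (region : List (Int × Int)) (board : List (List Int)) (revealed : List (List Bool)) (rows cols : Int) : List (Int × Int) :=
  region.flatMap (fun rc => (pvNbrs.map (fun o => (rc.1 + o.1, rc.2 + o.2))).filter (pvPass board revealed rows cols))

-- per-cell score: unaccounted mines if positive, else 0
def pvH (board : List (List Int)) (flagged : List (List Bool)) (rows cols : Int) (cell : Int × Int) : Int :=
  if 0 < PySem.List.pyGetD (PySem.List.pyGetD board cell.1 []) cell.2 0 - pvFlagCount flagged rows cols cell.1 cell.2 then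
    PySem.List.pyGetD (PySem.List.pyGetD board cell.1 []) cell.2 0 - pvFlagCount flagged rows cols cell.1 cell.2
  else 0

lemma pv_foldl_nested {α β : Type} (l₁ l₂ : List α) (f : β → α × α → β) (i : β) :
    l₁.foldl (fun b x => l₂.foldl (fun b y => f b (x, y)) b) i
      = (l₁.flatMap fun x => l₂.map fun y => (x, y)).foldl f i := by
  rw [List.foldl_flatMap]
  congr 1
  funext b x
  rw [List.foldl_map]

lemma pv_foldl_filter_map {α β σ : Type} (l : List α) (f : α → β) (p : β → Bool) (g : σ → β → σ) (d : σ) :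
    ((l.map f).filter p).foldl g d = l.foldl (fun d o => if p (f o) then g d (f o) else d) d := by
  induction l generalizing d with
  | nil => rfl
  | cons x xs ih =>
    by_cases hx : p (f x) <;> simp [hx, ih]

lemma pv_sum_flatMap {α β : Type} (l : List α) (f : α → List β) (h : β → Int) :
    ((l.flatMap f).map h).sum = (l.map (fun x => ((f x).map h).sum)).sum := by
  induction l with
  | nil => rfl
  | cons x xs ih => simp [List.flatMap_cons, ih]

lemma pv_sum_map_ite {α : Type} (l : List α) (p : α → Bool) (h : α → Int) :
    (l.map (fun x => if p x then h x else 0)).sum = ((l.filter p).map h).sum := by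
  induction l with
  | nil => rfl
  | cons x xs ih => by_cases hx : p x <;> simp [hx, ih]

lemma pv_sum_ite_single {α : Type} [DecidableEq α] (h : α → Int) (x : α) :
    ∀ (D : List α), D.Nodup → x ∈ D → (D.map (fun k => if k = x then h k else 0)).sum = h x := by
  intro D
  induction D with
  | nil => intro _ hx; simp at hx
  | cons y ys ih =>
    intro hD hx
    rcases List.mem_cons.mp hx with rfl | hx'
    · have hz : ∀ k ∈ ys, (if k = x then h k else 0) = 0 := by
        intro k hk
        have hkx : k ≠ x := fun hkx => (List.nodup_cons.mp hD).1 (hkx ▸ hk)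
        simp [hkx]
      simp [List.map_congr_left hz]
    · have hyx : y ≠ x := fun hyx => (List.nodup_cons.mp hD).1 (hyx ▸ hx')
      simp [hyx, ih (List.nodup_cons.mp hD).2 hx']

lemma pv_sum_count_mul {α : Type} [BEq α] [LawfulBEq α] [DecidableEq α] (h : α → Int) :
    ∀ (K D : List α), D.Nodup → (∀ k ∈ K, k ∈ D) →
      (D.map (fun k => h k * ((K.count k : Nat) : Int))).sum = (K.map h).sum := by
  intro K
  induction K with
  | nil => intro D _ _; simp
  | cons x K' ih =>
    intro D hD hsub
    have hx : x ∈ D := hsub x (List.mem_cons_self ..)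
    have step : ∀ k ∈ D, h k * (((x :: K').count k : Nat) : Int)
        = h k * ((K'.count k : Nat) : Int) + (if k = x then h k else 0) := by
      intro k _
      rcases eq_or_ne k x with rfl | hk
      · simp
        ring
      · simp [hk, Ne.symm hk]
    rw [List.map_congr_left step, PySem.List.sum_map_add_int,
        ih D hD (fun k hk => hsub k (List.mem_cons_of_mem _ hk)),
        pv_sum_ite_single h x D hD hx]
    simp [add_comm]

-- the first component of A's (flagged_count, hidden_count) pair fold, generically
lemma pv_pairfold_fst {α : Type} (P Q R : α → Bool) :
    ∀ (l : List α) (a b : Int),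
      (l.foldl (fun acc o =>
          if P o then (if Q o then (acc.1 + 1, acc.2) else if R o then (acc.1, acc.2 + 1) else acc) else acc) (a, b)).1
        = a + ((l.filter fun o => P o && Q o).length : Int) := by
  intro l
  induction l with
  | nil => intro a b; simp
  | cons o os ih =>
    intro a b
    by_cases h1 : P o
    · by_cases h2 : Q o
      · simp [h1, h2, ih]
        ring
      · by_cases h3 : R o
        · simp [h1, h2, h3, ih]
        · simp [h1, h2, h3, ih]
    · simp [h1, ih]

-- A's inner flagged/hidden loop: first component is B's 3×3 flagged count
set_option maxHeartbeats 1000000 in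
lemma pv_flaghid_fst (board : List (List Int)) (revealed flagged : List (List Bool)) (nr nc : Int) :
    (pvFlagHid board revealed flagged nr nc).1
      = pvFlagCount flagged (PySem.List.len board) (PySem.List.len (PySem.List.pyGetD board 0 [])) nr nc := by
  unfold pvFlagHid pvFlagCount
  rw [pv_foldl_nested]
  exact (pv_pairfold_fst
      (fun o => pvInB (PySem.List.len board) (PySem.List.len (PySem.List.pyGetD board 0 [])) (nr + o.1) (nc + o.2))
      (fun o => PySem.List.pyGetD (PySem.List.pyGetD flagged (nr + o.1) []) (nc + o.2) false)
      (fun o => !(PySem.List.pyGetD (PySem.List.pyGetD revealed (nr + o.1) []) (nc + o.2) false))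
      (pvOffs3.flatMap fun x => pvOffs3.map fun y => (x, y)) 0 0).trans (zero_add _)

-- A's loop body, generically: it adds the score of a passing neighbor and nothing else
lemma pv_condstep (c0 : Prop) [Decidable c0] (A B : Bool) (v w req : Int) :
    (if c0 then req
     else if A then (if B then (if 0 < v - w then req + (v - w) else req) else req) else req)
      = req + (if c0 then 0 else if A && B then (if 0 < v - w then v - w else 0) else 0) := by
  by_cases h0 : c0
  · simp [h0]
  · cases A
    · simp [h0]
    · cases B
      · simp [h0]
      · simp [h0]
        split <;> simp

lemma pv_astep_eq (board : List (List Int)) (revealed flagged : List (List Bool)) (rc : Int × Int) (req : Int) (o : Int × Int) :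
    pvAStep board revealed flagged rc req o
      = req + (if o.1 = 0 ∧ o.2 = 0 then 0
          else if pvPass board revealed (PySem.List.len board) (PySem.List.len (PySem.List.pyGetD board 0 [])) (rc.1 + o.1, rc.2 + o.2) then
            pvH board flagged (PySem.List.len board) (PySem.List.len (PySem.List.pyGetD board 0 [])) (rc.1 + o.1, rc.2 + o.2)
          else 0) := by
  unfold pvAStep pvPass pvH
  rw [pv_flaghid_fst]
  rw [pv_condstep (o.1 = 0 ∧ o.2 = 0)
      (pvInB (PySem.List.len board) (PySem.List.len (PySem.List.pyGetD board 0 [])) (rc.1 + o.1) (rc.2 + o.2))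
      (PySem.List.pyGetD (PySem.List.pyGetD revealed (rc.1 + o.1) []) (rc.2 + o.2) false &&
        decide (0 < PySem.List.pyGetD (PySem.List.pyGetD board (rc.1 + o.1) []) (rc.2 + o.2) 0))
      (PySem.List.pyGetD (PySem.List.pyGetD board (rc.1 + o.1) []) (rc.2 + o.2) 0)
      (pvFlagCount flagged (PySem.List.len board) (PySem.List.len (PySem.List.pyGetD board 0 [])) (rc.1 + o.1) (rc.2 + o.2)) req]
  congr 2
  rw [Bool.and_assoc]

-- A's neighbor sum over one region cell equals the score sum over its passing neighbors
lemma pv_cell_sum (board : List (List Int)) (revealed flagged : List (List Bool)) (rc : Int × Int) :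
    ((pvOffs3.flatMap fun x => pvOffs3.map fun y => (x, y)).map (fun o =>
        if o.1 = 0 ∧ o.2 = 0 then 0
        else if pvPass board revealed (PySem.List.len board) (PySem.List.len (PySem.List.pyGetD board 0 [])) (rc.1 + o.1, rc.2 + o.2) then
          pvH board flagged (PySem.List.len board) (PySem.List.len (PySem.List.pyGetD board 0 [])) (rc.1 + o.1, rc.2 + o.2)
        else 0)).sum
      = (((pvNbrs.map (fun o => (rc.1 + o.1, rc.2 + o.2))).filter
            (pvPass board revealed (PySem.List.len board) (PySem.List.len (PySem.List.pyGetD board 0 [])))).map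
          (pvH board flagged (PySem.List.len board) (PySem.List.len (PySem.List.pyGetD board 0 [])))).sum := by
  rw [List.filter_map, List.map_map, ← pv_sum_map_ite]
  simp only [pvOffs3, pvNbrs, List.flatMap_cons, List.flatMap_nil, List.map_cons, List.map_nil,
    List.append_nil, List.cons_append, List.nil_append, List.sum_cons, List.sum_nil, Function.comp]
  norm_num

-- A as a sum of scores over the multiset pvK
lemma pv_a_eq_sum (region : List (Int × Int)) (board : List (List Int)) (revealed flagged : List (List Bool)) :
    required_mines_in_region region board revealed flagged
      = max 0 (((pvK region board revealed (PySem.List.len board) (PySem.List.len (PySem.List.pyGetD board 0 []))).map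
          (pvH board flagged (PySem.List.len board) (PySem.List.len (PySem.List.pyGetD board 0 [])))).sum) := by
  unfold required_mines_in_region
  congr 1
  have hF : ∀ (req : Int) (rc : Int × Int),
      pvOffs3.foldl (fun req dr => pvOffs3.foldl (fun req dc => pvAStep board revealed flagged rc req (dr, dc)) req) req
        = req + (((pvNbrs.map (fun o => (rc.1 + o.1, rc.2 + o.2))).filter
              (pvPass board revealed (PySem.List.len board) (PySem.List.len (PySem.List.pyGetD board 0 [])))).map
            (pvH board flagged (PySem.List.len board) (PySem.List.len (PySem.List.pyGetD board 0 [])))).sum := by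
    intro req rc
    rw [pv_foldl_nested pvOffs3 pvOffs3 (pvAStep board revealed flagged rc) req,
        PySem.List.foldl_congr_mem _ _ _ req (fun acc o _ => pv_astep_eq board revealed flagged rc acc o),
        PySem.List.foldl_add, pv_cell_sum]
  rw [PySem.List.foldl_congr_mem _ _ _ 0 (fun acc rc _ => hF acc rc), PySem.List.foldl_add]
  unfold pvK
  rw [pv_sum_flatMap]
  omega

-- B's dict is the counter of pvK
lemma pv_adj_eq (region : List (Int × Int)) (board : List (List Int)) (revealed : List (List Bool)) (rows cols : Int) :
    pvAdjacency region board revealed rows cols = PySem.Dict.counter (pvK region board revealed rows cols) := by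
  unfold pvAdjacency pvK
  rw [← PySem.Dict.foldl_insert_getD_add_one_eq_counter, List.foldl_flatMap]
  congr 1
  funext d rc
  rw [pv_foldl_filter_map]

-- B as the same sum of scores over pvK
lemma pv_b_eq_sum (region : List (Int × Int)) (board : List (List Int)) (revealed flagged : List (List Bool)) :
    required_mines_in_region_alt region board revealed flagged
      = max 0 (((pvK region board revealed (PySem.List.len board) (PySem.List.len (PySem.List.pyGetD board 0 []))).map
          (pvH board flagged (PySem.List.len board) (PySem.List.len (PySem.List.pyGetD board 0 [])))).sum) := by
  unfold required_mines_in_region_alt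
  congr 1
  rw [pv_adj_eq, PySem.Dict.items_counter, List.foldl_map,
      PySem.List.foldl_congr_mem _ _
        (fun s k => s + pvH board flagged (PySem.List.len board) (PySem.List.len (PySem.List.pyGetD board 0 [])) k *
          (((pvK region board revealed (PySem.List.len board) (PySem.List.len (PySem.List.pyGetD board 0 []))).count k : Nat) : Int)) 0
        (by
          intro acc k _
          dsimp only
          unfold pvH
          rcases lt_or_ge 0 (PySem.List.pyGetD (PySem.List.pyGetD board k.1 []) k.2 0
              - pvFlagCount flagged (PySem.List.len board) (PySem.List.len (PySem.List.pyGetD board 0 [])) k.1 k.2) with hU | hU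
          · rw [if_pos hU, if_pos hU]
          · rw [if_neg (not_lt.mpr hU), if_neg (not_lt.mpr hU)]
            ring),
      PySem.List.foldl_add,
      pv_sum_count_mul _ _ _ (PySem.Set.nodup_ofList _)
        (fun k hk => (PySem.Set.mem_ofList _ _).mpr hk)]
  omega

-- ===== VERDICT (by name: the statement is the Claim_ definition above) =====
theorem required_mines_in_region_spec : Claim_equal_required_mines_in_region := by
  intro region board revealed flagged _ _
  unfold Spec_required_mines_in_region
  rw [pv_a_eq_sum, pv_b_eq_sum]
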